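-- pv_equiv track=rewrite | github.com/ConnorSiXiong/Top_2000 | Top_1504.py | one_row
-- ===== SOURCE A (Python) =====
-- from typing import List
--
-- def one_row(arr: List[int]) -> int:
--     if len(arr) == 0:
--         return 0
--     counter = 0
--     accumulated_rect = 0
--     for i in arr:
--         if i == 1:
--             accumulated_rect = accumulated_rect + 1  # 这个地方没看懂，为什么要累加
--         else:
--             accumulated_rect = 0
--         counter += accumulated_rect
--     return counter
-- ===== SOURCE B (Python) =====
-- from typing import List
--
-- def one_row(arr: List[int]) -> int:
--     # Group the array into maximal runs of 1s; each run of length L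
--     # contributes L*(L+1)//2 subarrays (closed form), instead of
--     # accumulating element by element.
--     total = 0
--     run = 0
--     for x in arr:
--         if x == 1:
--             run += 1
--         else:
--             total += run * (run + 1) // 2
--             run = 0
--     total += run * (run + 1) // 2
--     return total
-- ===== Notes on version B (the rewrite author's own statement) =====
-- stated objective: alternative
-- what changed: B groups the array into maximal runs of consecutive 1s and adds the closed-form triangular number run*(run+1)//2 per run, instead of A's per-element accumulation of the current run length into the counter.
import Mathlib
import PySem

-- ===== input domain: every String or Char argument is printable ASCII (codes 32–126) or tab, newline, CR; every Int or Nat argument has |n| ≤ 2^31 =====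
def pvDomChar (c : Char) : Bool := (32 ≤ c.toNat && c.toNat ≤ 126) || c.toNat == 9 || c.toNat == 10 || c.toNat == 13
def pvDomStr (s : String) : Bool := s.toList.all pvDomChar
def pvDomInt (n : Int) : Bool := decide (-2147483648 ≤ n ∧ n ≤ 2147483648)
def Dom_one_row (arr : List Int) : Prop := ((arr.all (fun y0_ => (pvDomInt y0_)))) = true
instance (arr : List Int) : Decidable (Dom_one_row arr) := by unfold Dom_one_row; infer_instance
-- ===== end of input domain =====

-- B replaces A's per-element accumulation with run grouping plus a closed-form
-- triangular sum per run of 1s (objective: alternative decomposition, same cost).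


-- ===== PORT A =====
-- state = (counter, accumulated_rect)
def one_row (arr : List Int) : Int :=
  if arr.length = 0 then 0
  else
    (arr.foldl (fun (p : Int × Int) i =>
      let acc := if i = 1 then p.2 + 1 else 0
      (p.1 + acc, acc)) (0, 0)).1

-- ===== PORT B =====
-- state = (total, run)
def one_row_alt (arr : List Int) : Int :=
  let s := arr.foldl (fun (p : Int × Int) x =>
    if x = 1 then (p.1, p.2 + 1)
    else (p.1 + PySem.Int.floordiv (p.2 * (p.2 + 1)) 2, 0)) (0, 0)
  s.1 + PySem.Int.floordiv (s.2 * (s.2 + 1)) 2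

-- ===== PRECONDITION & SPEC =====
def Spec_one_row (arr : List Int) (out : Int) : Prop := out = one_row_alt arr
instance (arr : List Int) (out : Int) : Decidable (Spec_one_row arr out) := by unfold Spec_one_row; infer_instance

-- ===== CLAIM (what is proved, stated in full; the proofs are below) =====
def Claim_equal_one_row : Prop := ∀ (arr : List Int), Dom_one_row arr → Spec_one_row arr (one_row arr)

-- ===== LEMMAS AND PROOFS =====

-- triangular number as B computes it
def pvTri (r : Int) : Int := PySem.Int.floordiv (r * (r + 1)) 2

theorem pvTri_succ (r : Int) (hr : 0 ≤ r) : pvTri (r + 1) = pvTri r + (r + 1) := by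
  unfold pvTri
  rw [PySem.Int.floordiv_eq_ediv_of_pos (by omega), PySem.Int.floordiv_eq_ediv_of_pos (by omega)]
  have h2 : (2 : Int) ∣ r * (r + 1) := (Int.even_mul_succ_self r).two_dvd
  have h3 : (2 : Int) ∣ (r + 1) * (r + 1 + 1) := (Int.even_mul_succ_self (r+1)).two_dvd
  have hmul : (r + 1) * (r + 1 + 1) = r * (r + 1) + 2 * (r + 1) := by ring
  omega

-- invariant: A's counter carries the current run's triangular part already added
theorem pv_inv (arr : List Int) : ∀ (cA cB r : Int), 0 ≤ r → cA = cB + pvTri r →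
    (arr.foldl (fun (p : Int × Int) i =>
      let acc := if i = 1 then p.2 + 1 else 0
      (p.1 + acc, acc)) (cA, r)).1
    = (let s := arr.foldl (fun (p : Int × Int) x =>
        if x = 1 then (p.1, p.2 + 1)
        else (p.1 + PySem.Int.floordiv (p.2 * (p.2 + 1)) 2, 0)) (cB, r)
       s.1 + PySem.Int.floordiv (s.2 * (s.2 + 1)) 2) := by
  induction arr with
  | nil =>
    intro cA cB r _ h
    simpa [pvTri] using h
  | cons x xs ih =>
    intro cA cB r hr h
    by_cases hx : x = 1
    · simp only [List.foldl_cons, hx]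
      exact ih (cA + (r + 1)) cB (r + 1) (by omega)
        (by rw [pvTri_succ r hr]; omega)
    · simp only [List.foldl_cons, if_neg hx]
      exact ih (cA + 0) (cB + PySem.Int.floordiv (r * (r + 1)) 2) 0 (by omega)
        (by simpa [pvTri] using h)

-- ===== VERDICT (by name: the statement is the Claim_ definition above) =====
theorem one_row_spec : Claim_equal_one_row := by
  intro arr _
  unfold Spec_one_row one_row one_row_alt
  cases arr with
  | nil => decide
  | cons x xs =>
    simp only [List.length_cons, if_neg (by omega : ¬ (xs.length + 1 = 0))]
    exact pv_inv (x :: xs) 0 0 0 le_rfl (by decide)
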